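-- pv_equiv track=rewrite | github.com/TomBenRu/advent_of_code_2025 | day_10/main.py | find_min_toggles
-- ===== SOURCE A (Python) =====
-- from collections import deque
--
-- def find_min_toggles(lights: list[int], buttons: list[list[int]]):
--     """
--     Find the minimum number of button presses to turn on the lights in the given pattern.
--     The order of the button presses does not matter.
--     Each button press toggles the lights of the given indexes.
--     Uses breath first search.
--
--     :param lights: list of 0s and 1s
--     :param buttons: list of lists of indexes
--
--     :return: minimum number of button presses
--     """
--
--     state_lights_at_start = tuple(0 for _ in range(len(lights)))
--     state_lights_at_end = tuple(lights)
--     queue = deque([(state_lights_at_start, 0)])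
--     visited = {state_lights_at_start}
--     while queue:
--         current_lights, toggles = queue.popleft()
--         if current_lights == state_lights_at_end:
--             return toggles
--         for button in buttons:
--             new_lights = [l for l in current_lights]
--             for i in button:
--                 new_lights[i] = 1 - new_lights[i]
--             new_lights = tuple(new_lights)
--             if new_lights in visited:
--                 continue
--             visited.add(new_lights)
--             queue.append((new_lights, toggles + 1))
-- ===== SOURCE B (Python) =====
-- def find_min_toggles(lights: list[int], buttons: list[list[int]]):
--     """Dynamic programming over the buttons instead of a BFS over light states.
--
--     Pressing a button twice cancels out and order never matters, so the answer
--     is the smallest number of distinct buttons whose combined toggles produce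
--     the target pattern.  Process the buttons one at a time, keeping a dict that
--     maps each producible pattern to the fewest presses that produce it.
--     """
--     n = len(lights)
--     target = tuple(lights)
--     if target == (0,) * n:
--         return 0
--     effects = []
--     for button in buttons:
--         e = [0] * n
--         for i in button:
--             e[i] = 1 - e[i]
--         effects.append(tuple(e))
--     best = {(0,) * n: 0}
--     for e in effects:
--         for s, c in list(best.items()):
--             t = tuple((a + b) % 2 for a, b in zip(s, e))
--             if t not in best or best[t] > c + 1:
--                 best[t] = c + 1
--     return best.get(target)
-- ===== Notes on version B (the rewrite author's own statement) =====
-- stated objective: alternative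
-- what changed: Replaces the breadth-first search over light states (deque + visited set + per-node press counters) by a dynamic program over the buttons: since order never matters and a double press cancels, B precomputes each button's toggle pattern once and folds over the buttons maintaining a dict from each producible pattern to the fewest presses producing it, answering with a single final lookup.
import Mathlib
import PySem

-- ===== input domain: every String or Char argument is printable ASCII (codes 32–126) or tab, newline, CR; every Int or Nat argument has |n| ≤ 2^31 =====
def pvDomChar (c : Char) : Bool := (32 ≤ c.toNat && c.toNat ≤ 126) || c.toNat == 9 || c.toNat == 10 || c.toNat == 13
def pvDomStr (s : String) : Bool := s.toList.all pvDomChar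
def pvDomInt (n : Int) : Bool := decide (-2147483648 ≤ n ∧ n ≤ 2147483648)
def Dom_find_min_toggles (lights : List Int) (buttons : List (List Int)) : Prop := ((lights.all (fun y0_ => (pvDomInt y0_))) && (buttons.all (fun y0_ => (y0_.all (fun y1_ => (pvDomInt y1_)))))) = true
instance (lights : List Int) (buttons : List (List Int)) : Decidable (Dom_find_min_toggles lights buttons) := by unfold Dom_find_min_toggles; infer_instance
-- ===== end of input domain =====

-- B re-implements the BFS as a dynamic program over the buttons (order of presses never matters and
-- a double press cancels, so the answer is the least number of distinct buttons whose combined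
-- toggles give the target); objective: alternative algorithm.

-- ===== PORT A =====
-- Python list index with negative wraparound (`new_lights[i] = 1 - new_lights[i]`); exact for
-- -len ≤ i < len (Pre_ excludes inputs where Python raises IndexError, where `List.set` would no-op).
def pvIx (n : Nat) (i : Int) : Nat := if i < 0 then (i + n).toNat else i.toNat

-- one `new_lights[i] = 1 - new_lights[i]` assignment
def pvToggle (s : List Int) (i : Int) : List Int :=
  let j := pvIx s.length i
  s.set j (1 - s.getD j 0)

-- `for i in button: new_lights[i] = 1 - new_lights[i]`
def pvPress (s : List Int) (button : List Int) : List Int := button.foldl pvToggle s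

-- the `for button in buttons:` expansion of one dequeued state
def pvExpandA (buttons : List (List Int)) (cur : List Int) (t : Int)
    (p : PySem.Set (List Int) × List (List Int × Int)) :
    PySem.Set (List Int) × List (List Int × Int) :=
  buttons.foldl (fun p b =>
    let nl := pvPress cur b
    if nl ∈ p.1 then p else (PySem.Set.add p.1 nl, p.2 ++ [(nl, t + 1)])) p

-- `while queue:` — fuel bounds the number of popleft's: each pop after the first is backed by a
-- distinct visited state, and visited holds distinct 0/1-lists of length n, so 2^n + 1 pops suffice
def pvLoopA (target : List Int) (buttons : List (List Int)) :
    Nat → List (List Int × Int) → PySem.Set (List Int) → Option Int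
  | 0, _, _ => none
  | _ + 1, [], _ => none
  | f + 1, (cur, t) :: rest, vis =>
    if cur = target then some t
    else
      let p := pvExpandA buttons cur t (vis, rest)
      pvLoopA target buttons f p.2 p.1

def find_min_toggles (lights : List Int) (buttons : List (List Int)) : Option Int :=
  let start := List.replicate lights.length 0
  pvLoopA lights buttons (2 ^ lights.length + 1) [(start, 0)] (PySem.Set.ofList [start])

-- ===== PORT B =====
-- `tuple((a + b) % 2 for a, b in zip(s, e))`
def pvXorRow (s e : List Int) : List Int :=
  (s.zip e).map (fun p => PySem.Int.mod (p.1 + p.2) 2)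

-- Python list index with negative wraparound, as in A (exact for -n ≤ i < n; see Pre_)
def pvIxB (n : Nat) (i : Int) : Nat := if i < 0 then (i + n).toNat else i.toNat

-- one button's effect pattern (`e = [0]*n; for i in button: e[i] = 1 - e[i]`)
def pvEffect (n : Nat) (button : List Int) : List Int :=
  button.foldl (fun e i =>
    let j := pvIxB n i
    e.set j (1 - e.getD j 0)) (List.replicate n (0 : Int))

-- `for s, c in list(best.items()): t = …; if t not in best or best[t] > c + 1: best[t] = c + 1`
def pvDPRound (e : List Int) (best : PySem.Dict (List Int) Int) : PySem.Dict (List Int) Int :=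
  best.items.foldl (fun d sc =>
    let t := pvXorRow sc.1 e
    match PySem.Dict.get? d t with
    | none => PySem.Dict.insert d t (sc.2 + 1)
    | some v => if sc.2 + 1 < v then PySem.Dict.insert d t (sc.2 + 1) else d) best

def find_min_toggles_alt (lights : List Int) (buttons : List (List Int)) : Option Int :=
  let n := lights.length
  let target := lights
  if target = List.replicate n 0 then some 0
  else
    let effects := buttons.map (fun b => pvEffect n b)
    let final := effects.foldl (fun d e => pvDPRound e d)
      (PySem.Dict.insert PySem.Dict.empty (List.replicate n (0 : Int)) 0)
    PySem.Dict.get? final target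

-- ===== PRECONDITION & SPEC =====
-- Pre_ excludes exactly the inputs where the Python A raises IndexError: when the target pattern is
-- not all-zero (so the BFS expands at least one state), every button index must be a valid Python
-- index of `lights` (negative indices wrap).  On an all-zero target A returns 0 before any toggle.
def Pre_find_min_toggles (lights : List Int) (buttons : List (List Int)) : Prop :=
  lights = List.replicate lights.length 0 ∨
    ∀ b ∈ buttons, ∀ i ∈ b, -(lights.length : Int) ≤ i ∧ i < (lights.length : Int)

instance (lights : List Int) (buttons : List (List Int)) :
    Decidable (Pre_find_min_toggles lights buttons) := by
  unfold Pre_find_min_toggles; infer_instance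

def pvWitness_find_min_toggles : List Int × List (List Int) := ([1, 1, 0], [[0], [1], [0, 1]])

def Spec_find_min_toggles (lights : List Int) (buttons : List (List Int)) (out : Option Int) : Prop :=
  out = find_min_toggles_alt lights buttons
instance (lights : List Int) (buttons : List (List Int)) (out : Option Int) : Decidable (Spec_find_min_toggles lights buttons out) := by unfold Spec_find_min_toggles; infer_instance

-- ===== CLAIM (what is proved, stated in full; the proofs are below) =====
def Claim_equal_find_min_toggles : Prop := ∀ (lights : List Int) (buttons : List (List Int)), Dom_find_min_toggles lights buttons → Pre_find_min_toggles lights buttons → Spec_find_min_toggles lights buttons (find_min_toggles lights buttons)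

-- ===== LEMMAS AND PROOFS =====

-- `SL n l`: l is a light state — a 0/1 list of length n.  All BFS states and all DP keys are such.
def SL (n : Nat) (l : List Int) : Prop := l.length = n ∧ ∀ x ∈ l, x = 0 ∨ x = 1

def zerosL (n : Nat) : List Int := List.replicate n 0

-- xor of a set of effect rows (the state a sub-collection of buttons produces)
def xorAll (n : Nat) (c : List (List Int)) : List Int := c.foldl pvXorRow (zerosL n)

-- minimal size of a sub-collection of `effs` producing t (the quantity both programs compute)
def cands (n : Nat) (effs : List (List Int)) (t : List Int) : List Nat :=
  (effs.sublists.filter (fun c => xorAll n c == t)).map List.length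

def msz (n : Nat) (effs : List (List Int)) (t : List Int) : Option Nat :=
  (cands n effs t).min?

def omin {α : Type} [Min α] : Option α → Option α → Option α
  | none, b => b
  | some a, none => some a
  | some a, some b => some (min a b)

theorem zerosL_SL (n : Nat) : SL n (zerosL n) := by
  constructor
  · simp [zerosL]
  · intro x hx
    left
    exact (List.eq_of_mem_replicate hx)


theorem length_xr (a b : List Int) : (pvXorRow a b).length = min a.length b.length := by
  simp [pvXorRow, List.length_zip]


theorem getElem_xr (a b : List Int) (i : Nat) (h : i < (pvXorRow a b).length) :
    (pvXorRow a b)[i] = (a[i]'(by simp [length_xr] at h; omega) + b[i]'(by simp [length_xr] at h; omega)) % 2 := by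
  simp [pvXorRow, List.getElem_map, List.getElem_zip]

theorem xr_SL {n : Nat} {a b : List Int} (ha : SL n a) (hb : SL n b) : SL n (pvXorRow a b) := by
  have hl : (pvXorRow a b).length = n := by simp [length_xr, ha.1, hb.1]
  refine ⟨hl, ?_⟩
  intro x hx
  obtain ⟨i, hi, rfl⟩ := List.mem_iff_getElem.mp hx
  rw [getElem_xr]
  omega

theorem xr_left_comm (x a b : List Int) :
    pvXorRow (pvXorRow x a) b = pvXorRow (pvXorRow x b) a := by
  have h1 : ∀ (u v : List Int), (pvXorRow u v).length = min u.length v.length := length_xr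
  apply List.ext_getElem
  · simp [h1]; omega
  · intro i hi₁ hi₂
    rw [getElem_xr, getElem_xr, getElem_xr, getElem_xr]
    omega


theorem xr_right_id {n : Nat} {a : List Int} (ha : SL n a) : pvXorRow a (zerosL n) = a := by
  apply List.ext_getElem
  · simp [length_xr, ha.1, zerosL]
  · intro i hi₁ hi₂
    rw [getElem_xr]
    have hz : (zerosL n)[i]'(by simpa [zerosL, length_xr, ha.1, zerosL] using hi₂) = 0 := by
      simp [zerosL]
    rw [hz]
    have := ha.2 (a[i]) (List.getElem_mem hi₂)
    omega


theorem xr_invol {n : Nat} {t e : List Int} (ht : SL n t) (he : SL n e) :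
    pvXorRow (pvXorRow t e) e = t := by
  apply List.ext_getElem
  · simp [length_xr, ht.1, he.1]
  · intro i hi₁ hi₂
    rw [getElem_xr, getElem_xr]
    have := ht.2 (t[i]) (List.getElem_mem hi₂)
    omega


theorem toggle_SL {n : Nat} {s : List Int} (hs : SL n s) (i : Int) : SL n (pvToggle s i) := by
  unfold pvToggle
  refine ⟨by simp [hs.1], ?_⟩
  intro x hx
  rcases List.mem_or_eq_of_mem_set hx with h | h
  · exact hs.2 x h
  · subst h
    by_cases hj : pvIx s.length i < s.length
    · have := hs.2 (s.getD (pvIx s.length i) 0) (by rw [List.getD_eq_getElem _ _ hj]; exact List.getElem_mem hj)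
      omega
    · rw [List.getD_eq_default _ _ (by omega)]
      right; norm_num


theorem press_SL {n : Nat} {s : List Int} (hs : SL n s) (b : List Int) : SL n (pvPress s b) := by
  unfold pvPress
  induction b generalizing s with
  | nil => exact hs
  | cons i b ih => exact ih (toggle_SL hs i)


theorem effect_eq_press (n : Nat) (b : List Int) : pvEffect n b = pvPress (zerosL n) b := by
  unfold pvEffect pvPress zerosL
  generalize hE : List.replicate n (0 : Int) = e
  have he : e.length = n := by rw [← hE]; simp
  clear hE
  induction b generalizing e with
  | nil => rfl
  | cons i b ih =>
    simp only [List.foldl_cons]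
    rw [show (e.set (pvIxB n i) (1 - e.getD (pvIxB n i) 0)) = pvToggle e i by
      unfold pvToggle pvIx pvIxB; rw [he]]
    exact ih _ (by unfold pvToggle; simp [he])

theorem effect_SL (n : Nat) (b : List Int) : SL n (pvEffect n b) := by
  rw [effect_eq_press]
  exact press_SL (zerosL_SL n) b

theorem toggle_eq (s : List Int) (i : Int) :
    pvToggle s i = s.set (pvIx s.length i) (1 - s.getD (pvIx s.length i) 0) := rfl

theorem toggle_xr {n : Nat} {s e : List Int} (hs : SL n s) (he : SL n e) (i : Int) :
    pvToggle (pvXorRow s e) i = pvXorRow s (pvToggle e i) := by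
  have hs1 := hs.1
  have he1 := he.1
  have hlen : (pvXorRow s e).length = n := by simp [length_xr, hs1, he1]
  rw [toggle_eq, toggle_eq, hlen, he1]
  by_cases hjn : pvIx n i < n
  · apply List.ext_getElem
    · simp [List.length_set, length_xr, hs1, he1]
    · intro p hp₁ hp₂
      have hpn : p < n := by
        have := List.length_set (as := pvXorRow s e) (i := pvIx n i)
          (a := 1 - (pvXorRow s e).getD (pvIx n i) 0)
        omega
      rw [List.getElem_set]
      by_cases hpj : pvIx n i = p
      · subst hpj
        rw [if_pos rfl, List.getD_eq_getElem _ _ (by omega : pvIx n i < (pvXorRow s e).length)]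
        rw [getElem_xr]
        rw [getElem_xr, List.getElem_set, if_pos rfl]
        have hD : e.getD (pvIx n i) 0 = e[pvIx n i]'(by omega) :=
          List.getD_eq_getElem _ _ (by omega)
        have hsj := hs.2 (s[pvIx n i]'(by omega)) (List.getElem_mem (by omega))
        have hej := he.2 (e[pvIx n i]'(by omega)) (List.getElem_mem (by omega))
        omega
      · rw [if_neg hpj, getElem_xr, getElem_xr, List.getElem_set, if_neg hpj]
  · rw [List.set_eq_of_length_le (by omega), List.set_eq_of_length_le (by omega)]

theorem press_eq_xr_effect {n : Nat} {s : List Int} (hs : SL n s) (b : List Int) :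
    pvPress s b = pvXorRow s (pvEffect n b) := by
  have key : ∀ (b : List Int) (e : List Int), SL n e →
      b.foldl pvToggle (pvXorRow s e) = pvXorRow s (b.foldl pvToggle e) := by
    intro b
    induction b with
    | nil => intro e _; rfl
    | cons i b ih =>
      intro e hee
      simp only [List.foldl_cons]
      rw [toggle_xr hs hee i]
      exact ih (pvToggle e i) (toggle_SL hee i)
  have h0 : pvPress s b = b.foldl pvToggle (pvXorRow s (zerosL n)) := by
    rw [xr_right_id hs]; rfl
  rw [h0, key b (zerosL n) (zerosL_SL n), effect_eq_press]
  rfl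


theorem foldl_xr_out (c : List (List Int)) (a e : List Int) :
    c.foldl pvXorRow (pvXorRow a e) = pvXorRow (c.foldl pvXorRow a) e := by
  induction c generalizing a with
  | nil => rfl
  | cons h t ih =>
    simp only [List.foldl_cons]
    rw [xr_left_comm a e h]
    exact ih (pvXorRow a h)


theorem xorAll_SL {n : Nat} {c : List (List Int)} (hc : ∀ e ∈ c, SL n e) : SL n (xorAll n c) := by
  unfold xorAll
  have : ∀ (c : List (List Int)) (a : List Int), SL n a → (∀ e ∈ c, SL n e) →
      SL n (c.foldl pvXorRow a) := by
    intro c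
    induction c with
    | nil => intro a ha _; exact ha
    | cons h t ih =>
      intro a ha hc
      exact ih _ (xr_SL ha (hc h (List.mem_cons_self))) (fun e he => hc e (List.mem_cons_of_mem _ he))
  exact this c _ (zerosL_SL n) hc


theorem xorAll_perm {n : Nat} {c c' : List (List Int)} (h : c.Perm c') : xorAll n c = xorAll n c' := by
  unfold xorAll
  exact @List.Perm.foldl_eq _ _ pvXorRow _ _ ⟨fun x a b => xr_left_comm x a b⟩ h (zerosL n)


theorem xorAll_erase {n : Nat} {c : List (List Int)} {e : List Int} (he : e ∈ c) :
    xorAll n c = pvXorRow (xorAll n (c.erase e)) e := by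
  have hp : List.Perm c (e :: c.erase e) := List.perm_cons_erase he
  rw [xorAll_perm hp]
  show (c.erase e).foldl pvXorRow (pvXorRow (zerosL n) e) = _
  rw [foldl_xr_out]
  rfl


theorem xorAll_concat (n : Nat) (c : List (List Int)) (e : List Int) :
    xorAll n (c ++ [e]) = pvXorRow (xorAll n c) e := by
  unfold xorAll
  rw [List.foldl_append]
  rfl


theorem msz_eq_some_iff {n : Nat} {effs : List (List Int)} {t : List Int} {k : Nat} :
    msz n effs t = some k ↔
      (∃ c, c.Sublist effs ∧ xorAll n c = t ∧ c.length = k) ∧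
      (∀ c, c.Sublist effs → xorAll n c = t → k ≤ c.length) := by
  unfold msz cands
  rw [List.min?_eq_some_iff]
  constructor
  · rintro ⟨hmem, hlb⟩
    constructor
    · simp only [List.mem_map, List.mem_filter, List.mem_sublists, beq_iff_eq] at hmem
      obtain ⟨c, ⟨hsub, hxor⟩, hlen⟩ := hmem
      exact ⟨c, hsub, hxor, hlen⟩
    · intro c hsub hxor
      exact hlb c.length (by
        simp only [List.mem_map, List.mem_filter, List.mem_sublists, beq_iff_eq]
        exact ⟨c, ⟨hsub, hxor⟩, rfl⟩)
  · rintro ⟨⟨c, hsub, hxor, hlen⟩, hlb⟩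
    constructor
    · simp only [List.mem_map, List.mem_filter, List.mem_sublists, beq_iff_eq]
      exact ⟨c, ⟨hsub, hxor⟩, hlen⟩
    · intro m hm
      simp only [List.mem_map, List.mem_filter, List.mem_sublists, beq_iff_eq] at hm
      obtain ⟨c', ⟨hsub', hxor'⟩, hlen'⟩ := hm
      rw [← hlen']
      exact hlb c' hsub' hxor' 


theorem msz_eq_none_iff {n : Nat} {effs : List (List Int)} {t : List Int} :
    msz n effs t = none ↔ ∀ c, c.Sublist effs → xorAll n c ≠ t := by
  unfold msz cands
  rw [List.min?_eq_none_iff]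
  simp [List.map_eq_nil_iff, List.filter_eq_nil_iff, List.mem_sublists]


theorem msz_le_candidate {n : Nat} {effs : List (List Int)} {c : List (List Int)}
    (hsub : c.Sublist effs) (t : List Int) (hxor : xorAll n c = t) :
    ∃ k ≤ c.length, msz n effs t = some k := by
  cases hmin : msz n effs t with
  | none => exact absurd hxor ((msz_eq_none_iff.mp hmin) c hsub)
  | some k =>
    obtain ⟨_, hlb⟩ := msz_eq_some_iff.mp hmin
    exact ⟨k, hlb c hsub hxor, rfl⟩

theorem msz_zeros (n : Nat) (effs : List (List Int)) : msz n effs (zerosL n) = some 0 := by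
  obtain ⟨k, hk, h⟩ := msz_le_candidate (List.nil_sublist effs) (zerosL n) (by rfl)
  simpa [Nat.le_zero.mp hk] using h

theorem msz_eq_zero {n : Nat} {effs : List (List Int)} {t : List Int}
    (h : msz n effs t = some 0) : t = zerosL n := by
  obtain ⟨⟨c, hsub, hxor, hlen⟩, _⟩ := msz_eq_some_iff.mp h
  rw [List.length_eq_zero_iff] at hlen
  subst hlen
  exact hxor.symm


theorem msz_SL {n : Nat} {effs : List (List Int)} {t : List Int} {k : Nat}
    (hall : ∀ e ∈ effs, SL n e) (h : msz n effs t = some k) : SL n t := by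
  obtain ⟨⟨c, hsub, hxor, _⟩, _⟩ := msz_eq_some_iff.mp h
  rw [← hxor]
  exact xorAll_SL (fun e he => hall e (hsub.mem he))


theorem subperm_candidate {n : Nat} {c effs : List (List Int)} (h : c.Subperm effs) :
    ∃ c', c'.Sublist effs ∧ c'.length = c.length ∧ xorAll n c' = xorAll n c := by
  obtain ⟨l, hperm, hsub⟩ := h
  exact ⟨l, hsub, hperm.length_eq, xorAll_perm hperm⟩


theorem msz_nbr {n : Nat} {effs : List (List Int)} {s e : List Int} {d : Nat}
    (hall : ∀ f ∈ effs, SL n f) (he : e ∈ effs) (hs : msz n effs s = some d) :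
    ∃ k ≤ d + 1, msz n effs (pvXorRow s e) = some k := by
  obtain ⟨⟨c, hsub, hxor, hlen⟩, _⟩ := msz_eq_some_iff.mp hs
  by_cases hec : e ∈ c
  · have hsub' : (c.erase e).Sublist effs := (List.erase_sublist).trans hsub
    have hSLer : SL n (xorAll n (c.erase e)) :=
      xorAll_SL (fun f hf => hall f (hsub.mem (List.mem_of_mem_erase hf)))
    have hxe : pvXorRow s e = xorAll n (c.erase e) := by
      rw [← hxor, xorAll_erase hec]
      exact xr_invol hSLer (hall e he)
    obtain ⟨k, hk, h⟩ := msz_le_candidate hsub' (pvXorRow s e) hxe.symm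
    have hle := List.length_erase_of_mem hec
    exact ⟨k, by omega, h⟩
  · have hsp : List.Subperm (e :: c) effs :=
      List.cons_subperm_of_not_mem_of_mem hec he hsub.subperm
    obtain ⟨c', hsub', hlen', hxor'⟩ := subperm_candidate (n := n) hsp
    have hxc : xorAll n (e :: c) = pvXorRow s e := by
      show c.foldl pvXorRow (pvXorRow (zerosL n) e) = _
      rw [foldl_xr_out]
      show pvXorRow (xorAll n c) e = _
      rw [hxor]
    obtain ⟨k, hk, h⟩ := msz_le_candidate hsub' _ (by rw [hxor', hxc])
    refine ⟨k, ?_, h⟩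
    simp only [List.length_cons] at hlen'
    omega


theorem msz_pred {n : Nat} {effs : List (List Int)} {t : List Int} {d : Nat}
    (hall : ∀ f ∈ effs, SL n f) (ht : msz n effs t = some (d + 1)) :
    ∃ s, msz n effs s = some d ∧ ∃ e ∈ effs, t = pvXorRow s e := by
  obtain ⟨⟨c, hsub, hxor, hlen⟩, _⟩ := msz_eq_some_iff.mp ht
  have hcne : c ≠ [] := by intro h; subst h; simp at hlen
  obtain ⟨e, he⟩ := List.exists_mem_of_ne_nil c hcne
  have heeffs : e ∈ effs := hsub.mem he
  have hsub' : (c.erase e).Sublist effs := (List.erase_sublist).trans hsub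
  obtain ⟨d', hd', hmszs⟩ := msz_le_candidate hsub' (xorAll n (c.erase e)) rfl
  have hteq : t = pvXorRow (xorAll n (c.erase e)) e := by rw [← hxor, ← xorAll_erase he]
  obtain ⟨k, hk, hmszt⟩ := msz_nbr hall heeffs hmszs
  rw [← hteq] at hmszt
  have hkd : k = d + 1 := by
    rw [ht] at hmszt
    exact (Option.some_inj.mp hmszt).symm
  have hlene : (c.erase e).length = d := by
    rw [List.length_erase_of_mem he, hlen]
    omega
  refine ⟨xorAll n (c.erase e), ?_, e, heeffs, hteq⟩
  have : d' = d := by omega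
  rw [← this]
  exact hmszs


theorem foldl_min_assoc (u : List Nat) (a : Nat) :
    ∀ b, u.foldl min (min a b) = min a (u.foldl min b) := by
  induction u with
  | nil => intro b; rfl
  | cons c u ih =>
    intro b
    simp only [List.foldl_cons]
    rw [min_assoc, ih]

theorem min?_append_nat (xs ys : List Nat) : (xs ++ ys).min? = omin xs.min? ys.min? := by
  cases xs with
  | nil => cases ys <;> rfl
  | cons x t =>
    cases ys with
    | nil => simp [List.min?, omin]
    | cons y u =>
      show some ((t ++ y :: u).foldl min x) = some (min (t.foldl min x) (u.foldl min y))
      rw [List.foldl_append]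
      show some (u.foldl min (min (t.foldl min x) y)) = _
      rw [foldl_min_assoc]

theorem min?_map_succ (l : List Nat) : (l.map (· + 1)).min? = l.min?.map (· + 1) := by
  cases l with
  | nil => rfl
  | cons x t =>
    show some ((t.map (· + 1)).foldl min (x + 1)) = some ((t.foldl min x) + 1)
    congr 1
    induction t generalizing x with
    | nil => rfl
    | cons y u ih =>
      simp only [List.map_cons, List.foldl_cons]
      rw [show min (x + 1) (y + 1) = (min x y) + 1 by omega]
      exact ih (min x y)

theorem msz_recur {n : Nat} {effs : List (List Int)} {e t : List Int}
    (hall : ∀ f ∈ effs, SL n f) (he : SL n e) (ht : SL n t) :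
    msz n (effs ++ [e]) t = omin (msz n effs t) ((msz n effs (pvXorRow t e)).map (· + 1)) := by
  have h2 : ∀ c ∈ effs.sublists,
      (((fun c => xorAll n c == t) ∘ fun x => x ++ [e]) c
        = (fun c => xorAll n c == pvXorRow t e) c) := by
    intro c hc
    have hSLc : SL n (xorAll n c) :=
      xorAll_SL (fun f hf => hall f ((List.mem_sublists.mp hc).mem hf))
    simp only [Function.comp_apply, xorAll_concat]
    by_cases hx : xorAll n c = pvXorRow t e
    · simp [hx, xr_invol ht he]
    · have hx2 : pvXorRow (xorAll n c) e ≠ t := by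
        intro hcontra
        apply hx
        rw [← xr_invol hSLc he, hcontra]
      simp [hx, hx2]
  unfold msz cands
  rw [List.sublists_concat, List.filter_append, List.map_append, min?_append_nat]
  congr 1
  rw [List.filter_map, List.filter_congr h2, List.map_map]
  have h3 : (List.length ∘ fun c => c ++ [e]) = (fun k => k + 1) ∘ List.length := by
    funext c
    simp
  rw [h3, ← List.map_map, min?_map_succ]

theorem card_SL {n : Nat} {vis : List (List Int)} (hnd : vis.Nodup) (hSL : ∀ s ∈ vis, SL n s) :
    vis.length ≤ 2 ^ n := by
  classical
  set enc : List Int → (Fin n → Bool) := fun l => fun j => decide (l.getD (j : Nat) 0 = 1) with henc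
  have hinj : ∀ x ∈ vis, ∀ y ∈ vis, enc x = enc y → x = y := by
    intro x hx y hy hxy
    have hxS := hSL x hx
    have hyS := hSL y hy
    apply List.ext_getElem (by rw [hxS.1, hyS.1])
    intro j hj₁ hj₂
    have hjn : j < n := by rw [← hxS.1]; exact hj₁
    have := congrFun hxy ⟨j, hjn⟩
    simp only [henc] at this
    rw [List.getD_eq_getElem _ _ hj₁, List.getD_eq_getElem _ _ hj₂] at this
    have hx01 := hxS.2 (x[j]) (List.getElem_mem hj₁)
    have hy01 := hyS.2 (y[j]) (List.getElem_mem hj₂)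
    rcases hx01 with h1 | h1 <;> rcases hy01 with h2 | h2 <;> simp [h1, h2] at this ⊢
  have hnd' : (vis.map enc).Nodup := List.Nodup.map_on hinj hnd
  have hle := hnd'.length_le_card
  simpa using hle


-- ===== A-side BFS machinery =====

-- fresh neighbours of s, in button order, deduplicated against an evolving visited list
def freshNbrs (s : List Int) : List (List Int) → List (List Int) → List (List Int)
  | _, [] => []
  | vis, b :: bs =>
    let nl := pvPress s b
    if nl ∈ vis then freshNbrs s vis bs else nl :: freshNbrs s (vis ++ [nl]) bs

theorem set_add_of_not_mem {x : List Int} {v : PySem.Set (List Int)} (h : x ∉ v) :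
    PySem.Set.add v x = v ++ [x] := by
  simp [PySem.Set.add, h]

theorem expandA_eq (buttons : List (List Int)) (s : List Int) (t : Int)
    (vis : List (List Int)) (q : List (List Int × Int)) :
    pvExpandA buttons s t (vis, q) =
      (vis ++ freshNbrs s vis buttons,
        q ++ (freshNbrs s vis buttons).map (fun nl => (nl, t + 1))) := by
  unfold pvExpandA
  induction buttons generalizing vis q with
  | nil => simp [freshNbrs]
  | cons b bs ih =>
    simp only [List.foldl_cons, freshNbrs]
    by_cases hmem : pvPress s b ∈ vis
    · rw [if_pos hmem, if_pos hmem]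
      exact ih vis q
    · rw [if_neg hmem, if_neg hmem, set_add_of_not_mem hmem]
      rw [ih (vis ++ [pvPress s b]) (q ++ [(pvPress s b, t + 1)])]
      simp


theorem freshNbrs_disjoint (s : List Int) (vis : List (List Int)) (bs : List (List Int)) :
    ∀ t ∈ freshNbrs s vis bs, t ∉ vis := by
  induction bs generalizing vis with
  | nil => intro t ht; simp [freshNbrs] at ht
  | cons b bs ih =>
    intro t ht
    unfold freshNbrs at ht
    by_cases hmem : pvPress s b ∈ vis
    · rw [if_pos hmem] at ht
      exact ih vis t ht
    · rw [if_neg hmem] at ht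
      rcases List.mem_cons.mp ht with h | h
      · subst h; exact hmem
      · intro hv
        exact (ih (vis ++ [pvPress s b]) t h) (by simp [hv])


theorem freshNbrs_nodup (s : List Int) (vis : List (List Int)) (bs : List (List Int)) :
    (freshNbrs s vis bs).Nodup := by
  induction bs generalizing vis with
  | nil => exact List.nodup_nil
  | cons b bs ih =>
    unfold freshNbrs
    by_cases hmem : pvPress s b ∈ vis
    · rw [if_pos hmem]
      exact ih vis
    · rw [if_neg hmem]
      refine List.Nodup.cons ?_ (ih (vis ++ [pvPress s b]))
      intro hcon
      have := freshNbrs_disjoint s (vis ++ [pvPress s b]) bs _ hcon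
      simp at this


theorem mem_freshNbrs (s : List Int) (vis : List (List Int)) (bs : List (List Int)) (t : List Int) :
    t ∈ freshNbrs s vis bs ↔ t ∉ vis ∧ ∃ b ∈ bs, t = pvPress s b := by
  induction bs generalizing vis with
  | nil => simp [freshNbrs]
  | cons b bs ih =>
    unfold freshNbrs
    by_cases hmem : pvPress s b ∈ vis
    · rw [if_pos hmem, ih vis]
      constructor
      · rintro ⟨hnv, bb, hbb, rfl⟩
        exact ⟨hnv, bb, List.mem_cons_of_mem _ hbb, rfl⟩
      · rintro ⟨hnv, bb, hbb, rfl⟩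
        rcases List.mem_cons.mp hbb with h | h
        · subst h; exact absurd hmem hnv
        · exact ⟨hnv, bb, h, rfl⟩
    · rw [if_neg hmem, List.mem_cons, ih (vis ++ [pvPress s b])]
      constructor
      · rintro (rfl | ⟨hnv, bb, hbb, rfl⟩)
        · exact ⟨hmem, b, List.mem_cons_self, rfl⟩
        · refine ⟨fun hv => hnv (by simp [hv]), bb, List.mem_cons_of_mem _ hbb, rfl⟩
      · rintro ⟨hnv, bb, hbb, rfl⟩
        rcases List.mem_cons.mp hbb with h | h
        · subst h; left; rfl
        · by_cases heq : pvPress s bb = pvPress s b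
          · left; exact heq
          · right
            refine ⟨?_, bb, h, rfl⟩
            simp only [List.mem_append, List.mem_singleton]
            rintro (hv | hv)
            · exact hnv hv
            · exact heq hv


theorem loopA_none_of_not_SL {n : Nat} {target : List Int} {buttons : List (List Int)}
    (hne : ¬ SL n target) :
    ∀ (f : Nat) (q : List (List Int × Int)) (vis : PySem.Set (List Int)),
      (∀ p ∈ q, SL n p.1) → pvLoopA target buttons f q vis = none := by
  intro f
  induction f with
  | zero => intro q vis _; rfl
  | succ f ih =>
    intro q vis hq
    cases q with
    | nil => rfl
    | cons p rest =>
      obtain ⟨cur, t⟩ := p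
      have hcur : SL n cur := hq (cur, t) List.mem_cons_self
      have hne' : cur ≠ target := fun h => hne (h ▸ hcur)
      show pvLoopA target buttons (f + 1) ((cur, t) :: rest) vis = none
      unfold pvLoopA
      rw [if_neg hne']
      rw [expandA_eq]
      apply ih
      intro p hp
      rcases List.mem_append.mp hp with h | h
      · exact hq p (List.mem_cons_of_mem _ h)
      · obtain ⟨nl, hnl, rfl⟩ := List.mem_map.mp h
        obtain ⟨_, b, _, rfl⟩ := (mem_freshNbrs cur vis buttons nl).mp hnl
        exact press_SL hcur b


-- the big level-by-level invariant connecting A's queue BFS to the minimal-sub-collection function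
theorem loopA_inner (lights : List Int) (buttons : List (List Int)) :
    ∀ (M : Nat), ∀ (d : Nat) (rem nxt vis : List (List Int)) (f : Nat),
      M = 2 * (2 ^ lights.length - vis.length) + rem.length + 2 * nxt.length →
      vis.Nodup →
      (∀ s ∈ vis, SL lights.length s) →
      nxt.Nodup →
      (∀ s ∈ rem, msz lights.length (buttons.map (pvEffect lights.length)) s = some d) →
      (∀ t ∈ nxt, msz lights.length (buttons.map (pvEffect lights.length)) t = some (d + 1)) →
      (∀ t, t ∈ vis ↔
        ((∃ k ≤ d, msz lights.length (buttons.map (pvEffect lights.length)) t = some k) ∨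
          t ∈ nxt)) →
      (∀ t, msz lights.length (buttons.map (pvEffect lights.length)) t = some (d + 1) →
        t ∈ nxt ∨ ∃ s ∈ rem, ∃ b ∈ buttons, t = pvPress s b) →
      (msz lights.length (buttons.map (pvEffect lights.length)) lights = some d →
        lights ∈ rem) →
      (∀ k < d, msz lights.length (buttons.map (pvEffect lights.length)) lights ≠ some k) →
      rem.length + nxt.length + (2 ^ lights.length - vis.length) ≤ f →
      pvLoopA lights buttons f
          (rem.map (fun s => (s, (d : Int))) ++ nxt.map (fun s => (s, (d : Int) + 1))) vis =
        (msz lights.length (buttons.map (pvEffect lights.length)) lights).map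
          (fun k => (k : Int)) := by
  intro M
  induction M using Nat.strong_induction_on with
  | _ M IH =>
  intro d rem nxt vis f hM hndv hSLv hndn hrem hnxt hvis hcomp htin htlt hf
  have hallE : ∀ e ∈ buttons.map (pvEffect lights.length), SL lights.length e := by
    intro e he
    obtain ⟨b, _, rfl⟩ := List.mem_map.mp he
    exact effect_SL lights.length b
  cases rem with
  | nil =>
    cases nxt with
    | nil =>
      have hlev : ∀ t, msz lights.length (buttons.map (pvEffect lights.length)) t ≠
          some (d + 1) := by
        intro t h
        rcases hcomp t h with h' | ⟨s, hs, _⟩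
        · simp at h'
        · simp at hs
      have hchain : ∀ (j : Nat) (t : List Int),
          msz lights.length (buttons.map (pvEffect lights.length)) t ≠ some (d + 1 + j) := by
        intro j
        induction j with
        | zero => exact hlev
        | succ j ihj =>
          intro t h
          have : d + 1 + (j + 1) = (d + 1 + j) + 1 := by omega
          rw [this] at h
          obtain ⟨s, hs, _⟩ := msz_pred hallE h
          exact ihj s hs
      have hnone : msz lights.length (buttons.map (pvEffect lights.length)) lights = none := by
        cases hl : msz lights.length (buttons.map (pvEffect lights.length)) lights with
        | none => rfl
        | some k =>
          exfalso
          rcases Nat.lt_trichotomy k d with hk | hk | hk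
          · exact htlt k hk hl
          · subst hk
            simpa using htin hl
          · have : k = d + 1 + (k - d - 1) := by omega
            rw [this] at hl
            exact hchain _ _ hl
      rw [hnone]
      cases f <;> rfl
    | cons t0 nxtt =>
      have hqeq : ([] : List (List Int)).map (fun s => (s, (d : Int))) ++
          (t0 :: nxtt).map (fun s => (s, (d : Int) + 1)) =
          (t0 :: nxtt).map (fun s => (s, ((d + 1 : Nat) : Int))) ++
          ([] : List (List Int)).map (fun s => (s, ((d + 1 : Nat) : Int) + 1)) := by
        simp
      rw [hqeq]
      have hM' : 2 * (2 ^ lights.length - vis.length) + (t0 :: nxtt).length + 2 * 0 < M := by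
        rw [hM]
        simp [List.length_cons]
      apply IH _ hM' (d + 1) (t0 :: nxtt) [] vis f rfl hndv hSLv List.nodup_nil hnxt
        (by intro t ht; simp at ht)
      · intro t
        rw [hvis t]
        constructor
        · rintro (⟨k, hk, hm⟩ | hm)
          · exact Or.inl ⟨k, by omega, hm⟩
          · exact Or.inl ⟨d + 1, le_refl _, hnxt t hm⟩
        · rintro (⟨k, hk, hm⟩ | hm)
          · rcases Nat.lt_or_ge k (d + 1) with h | h
            · exact Or.inl ⟨k, by omega, hm⟩
            · have : k = d + 1 := by omega
              subst this
              rcases hcomp t hm with h' | ⟨s, hs, _⟩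
              · exact Or.inr h'
              · simp at hs
          · simp at hm
      · intro t ht
        obtain ⟨s, hs, e, he, rfl⟩ := msz_pred hallE ht
        have hsn : s ∈ t0 :: nxtt := by
          rcases hcomp s hs with h' | ⟨s', hs', _⟩
          · exact h'
          · simp at hs'
        obtain ⟨b, hb, rfl⟩ := List.mem_map.mp he
        refine Or.inr ⟨s, hsn, b, hb, ?_⟩
        rw [press_eq_xr_effect (msz_SL hallE hs) b]
      · intro h
        rcases hcomp lights h with h' | ⟨s', hs', _⟩
        · exact h'
        · simp at hs'
      · intro k hk
        rcases Nat.lt_or_ge k d with h | h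
        · exact htlt k h
        · have : k = d := by omega
          subst this
          intro hm
          simpa using htin hm
      · simpa using hf
  | cons s remt =>
    have hsd := hrem s List.mem_cons_self
    have hSLs : SL lights.length s := msz_SL hallE hsd
    cases f with
    | zero =>
      exfalso
      simp [List.length_cons] at hf
    | succ f =>
      simp only [List.map_cons, List.cons_append]
      show pvLoopA lights buttons (f + 1)
        ((s, (d : Int)) ::
          (remt.map (fun s => (s, (d : Int))) ++ nxt.map (fun s => (s, (d : Int) + 1)))) vis = _
      rw [pvLoopA]
      by_cases hst : s = lights
      · rw [if_pos hst]
        subst hst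
        rw [hsd]
        rfl
      · rw [if_neg hst]
        rw [expandA_eq]
        have hnews := mem_freshNbrs s vis buttons
        set news := freshNbrs s vis buttons with hnewsdef
        have hnewsSL : ∀ t ∈ news, SL lights.length t := by
          intro t ht
          obtain ⟨_, b, _, rfl⟩ := (hnews t).mp ht
          exact press_SL hSLs b
        have hnewsmsz : ∀ t ∈ news,
            msz lights.length (buttons.map (pvEffect lights.length)) t = some (d + 1) := by
          intro t ht
          obtain ⟨hnv, b, hb, rfl⟩ := (hnews t).mp ht
          have hpe : pvPress s b = pvXorRow s (pvEffect lights.length b) :=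
            press_eq_xr_effect hSLs b
          obtain ⟨k, hk, hm⟩ := msz_nbr hallE
            (List.mem_map.mpr ⟨b, hb, rfl⟩) hsd
          rw [← hpe] at hm
          have : k = d + 1 := by
            by_contra hne
            exact hnv ((hvis _).mpr (Or.inl ⟨k, by omega, hm⟩))
          rw [← this]
          exact hm
        have hdisj : ∀ t ∈ news, t ∉ vis := freshNbrs_disjoint s vis buttons
        have hndnews : news.Nodup := freshNbrs_nodup s vis buttons
        have hndv' : (vis ++ news).Nodup := by
          rw [List.nodup_append]
          exact ⟨hndv, hndnews, by
            intro a ha b hbn hab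
            exact hdisj b hbn (hab ▸ ha)⟩
        have hSLv' : ∀ t ∈ vis ++ news, SL lights.length t := by
          intro t ht
          rcases List.mem_append.mp ht with h | h
          · exact hSLv t h
          · exact hnewsSL t h
        have hcard : (vis ++ news).length ≤ 2 ^ lights.length := card_SL hndv' hSLv'
        have hcardv : vis.length ≤ 2 ^ lights.length := card_SL hndv hSLv
        simp only [List.length_append] at hcard
        have hqeq : (remt.map (fun s => (s, (d : Int))) ++
              nxt.map (fun s => (s, (d : Int) + 1))) ++
              news.map (fun nl => (nl, (d : Int) + 1)) =
            remt.map (fun s => (s, (d : Int))) ++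
              (nxt ++ news).map (fun s => (s, (d : Int) + 1)) := by
          rw [List.map_append, List.append_assoc]
        rw [hqeq]
        have hnxtvis : ∀ t ∈ nxt, t ∈ vis := by
          intro t ht
          rw [hvis t]
          exact Or.inr ht
        have hM' : 2 * (2 ^ lights.length - (vis ++ news).length) + remt.length +
            2 * (nxt ++ news).length < M := by
          rw [hM]
          simp only [List.length_append, List.length_cons]
          omega
        apply IH _ hM' d remt (nxt ++ news) (vis ++ news) f rfl hndv' hSLv'
        · rw [List.nodup_append]
          refine ⟨hndn, hndnews, ?_⟩
          intro a ha b hbn hab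
          exact hdisj b hbn (hab ▸ hnxtvis a ha)
        · intro t ht
          exact hrem t (List.mem_cons_of_mem _ ht)
        · intro t ht
          rcases List.mem_append.mp ht with h | h
          · exact hnxt t h
          · exact hnewsmsz t h
        · intro t
          constructor
          · intro ht
            rcases List.mem_append.mp ht with h | h
            · rcases (hvis t).mp h with h' | h'
              · exact Or.inl h'
              · exact Or.inr (List.mem_append_left _ h')
            · exact Or.inr (List.mem_append_right _ h)
          · rintro (⟨k, hk, hm⟩ | hm)
            · exact List.mem_append_left _ ((hvis t).mpr (Or.inl ⟨k, hk, hm⟩))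
            · rcases List.mem_append.mp hm with h | h
              · exact List.mem_append_left _ ((hvis t).mpr (Or.inr h))
              · exact List.mem_append_right _ h
        · intro t ht
          rcases hcomp t ht with h | ⟨s', hs', b, hb, rfl⟩
          · exact Or.inl (List.mem_append_left _ h)
          · rcases List.mem_cons.mp hs' with h' | h'
            · subst h'
              by_cases hv : pvPress s' b ∈ vis
              · rcases (hvis _).mp hv with ⟨k, hk, hm⟩ | hm
                · rw [ht] at hm
                  have : d + 1 = k := Option.some_inj.mp hm
                  omega
                · exact Or.inl (List.mem_append_left _ hm)
              · refine Or.inl (List.mem_append_right _ ?_)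
                exact (hnews _).mpr ⟨hv, b, hb, rfl⟩
            · exact Or.inr ⟨s', h', b, hb, rfl⟩
        · intro h
          rcases List.mem_cons.mp (htin h) with h' | h'
          · exact absurd h'.symm hst
          · exact h'
        · exact htlt
        · simp only [List.length_append]
          simp [List.length_cons] at hf
          omega


-- ===== B-side DP machinery =====

def DictOK (n : Nat) (d : PySem.Dict (List Int) Int) : Prop :=
  (PySem.Dict.keys d).Nodup ∧ ∀ k ∈ PySem.Dict.keys d, SL n k

theorem min?_const_int {l : List Int} {v : Int} (hne : l ≠ []) (hall : ∀ x ∈ l, x = v) :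
    l.min? = some v := by
  induction l with
  | nil => exact absurd rfl hne
  | cons x t ih =>
    have hx : x = v := hall x List.mem_cons_self
    subst hx
    cases t with
    | nil => rfl
    | cons y u =>
      have ht := ih (by simp) (fun z hz => hall z (List.mem_cons_of_mem _ hz))
      rw [List.min?_cons, ht]
      simp

theorem omin_min?_cons {a : Option Int} {v : Int} {l : List Int} :
    omin (some (a.elim v (fun w => min w v))) l.min? = omin a ((v :: l).min?) := by
  rw [List.min?_cons]
  cases hq : l.min? with
  | none => cases a <;> simp [omin, Option.elim]
  | some w => cases a <;> simp [omin, Option.elim]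

def dpStep (e : List Int) : PySem.Dict (List Int) Int → (List Int × Int) → PySem.Dict (List Int) Int :=
  fun d sc =>
    match PySem.Dict.get? d (pvXorRow sc.1 e) with
    | none => PySem.Dict.insert d (pvXorRow sc.1 e) (sc.2 + 1)
    | some v => if sc.2 + 1 < v then PySem.Dict.insert d (pvXorRow sc.1 e) (sc.2 + 1) else d

theorem dpRound_eq (e : List Int) (best : PySem.Dict (List Int) Int) :
    pvDPRound e best = best.items.foldl (dpStep e) best := rfl

theorem dpStep_get {e : List Int} (d : PySem.Dict (List Int) Int)
    (sc : List Int × Int) (x : List Int) :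
    PySem.Dict.get? (dpStep e d sc) x =
      if x = pvXorRow sc.1 e then
        some ((PySem.Dict.get? d (pvXorRow sc.1 e)).elim (sc.2 + 1) (fun v => min v (sc.2 + 1)))
      else PySem.Dict.get? d x := by
  unfold dpStep
  cases hv : PySem.Dict.get? d (pvXorRow sc.1 e) with
  | none =>
    rw [PySem.Dict.get?_insert]
    by_cases hx : x = pvXorRow sc.1 e <;> simp [hx]
  | some v =>
    show PySem.Dict.get?
        (if sc.2 + 1 < v then PySem.Dict.insert d (pvXorRow sc.1 e) (sc.2 + 1) else d) x = _
    by_cases hlt : sc.2 + 1 < v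
    · rw [if_pos hlt, PySem.Dict.get?_insert]
      by_cases hx : x = pvXorRow sc.1 e
      · simp only [Option.elim]
        rw [min_eq_right (le_of_lt hlt)]
      · simp [hx]
    · rw [if_neg hlt]
      by_cases hx : x = pvXorRow sc.1 e
      · simp only [Option.elim]
        rw [min_eq_left (by omega)]
        simp [hx, hv]
      · simp [hx]

theorem dpStep_ok {n : Nat} {e : List Int} {d : PySem.Dict (List Int) Int}
    (hd : DictOK n d) (he : SL n e) {sc : List Int × Int} (hsc : SL n sc.1) :
    DictOK n (dpStep e d sc) := by
  unfold dpStep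
  have hins : DictOK n (PySem.Dict.insert d (pvXorRow sc.1 e) (sc.2 + 1)) := by
    refine ⟨PySem.Dict.nodup_keys_insert _ _ _ hd.1, ?_⟩
    intro k hk
    rcases (PySem.Dict.mem_keys_insert _ _ _ _).mp hk with h | h
    · subst h; exact xr_SL hsc he
    · exact hd.2 k h
  cases hv : PySem.Dict.get? d (pvXorRow sc.1 e) with
  | none => exact hins
  | some v =>
    show DictOK n
      (if sc.2 + 1 < v then PySem.Dict.insert d (pvXorRow sc.1 e) (sc.2 + 1) else d)
    by_cases hlt : sc.2 + 1 < v
    · rw [if_pos hlt]; exact hins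
    · rw [if_neg hlt]; exact hd

theorem dpr_go_ok {n : Nat} {e : List Int} (he : SL n e) :
    ∀ (L : List (List Int × Int)) (d' : PySem.Dict (List Int) Int), DictOK n d' →
      (∀ sc ∈ L, SL n sc.1) → DictOK n (L.foldl (dpStep e) d') := by
  intro L
  induction L with
  | nil => intro d' hd' _; exact hd'
  | cons sc L ih =>
    intro d' hd' hL
    exact ih _ (dpStep_ok hd' he (hL sc List.mem_cons_self))
      (fun p hp => hL p (List.mem_cons_of_mem _ hp))

theorem dpr_go_get {n : Nat} {e : List Int} (he : SL n e) :
    ∀ (L : List (List Int × Int)) (d' : PySem.Dict (List Int) Int), DictOK n d' →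
      (∀ sc ∈ L, SL n sc.1) → ∀ t, SL n t →
      PySem.Dict.get? (L.foldl (dpStep e) d') t =
        omin (PySem.Dict.get? d' t)
          (((L.filter (fun sc => pvXorRow sc.1 e == t)).map (fun sc => sc.2 + 1)).min?) := by
  intro L
  induction L with
  | nil =>
    intro d' _ _ t _
    simp only [List.foldl_nil, List.filter_nil, List.map_nil]
    cases PySem.Dict.get? d' t <;> rfl
  | cons sc L ih =>
    intro d' hd' hL t ht
    have hsc : SL n sc.1 := hL sc List.mem_cons_self
    have hL' : ∀ p ∈ L, SL n p.1 := fun p hp => hL p (List.mem_cons_of_mem _ hp)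
    have hd'' : DictOK n (dpStep e d' sc) := dpStep_ok hd' he hsc
    rw [List.foldl_cons, ih _ hd'' hL' t ht, List.filter_cons]
    by_cases hteq : pvXorRow sc.1 e = t
    · rw [if_pos (by simp [hteq]), dpStep_get _ _ _, if_pos hteq.symm, hteq]
      simp only [List.map_cons]
      exact omin_min?_cons
    · rw [if_neg (by simp [hteq]), dpStep_get _ _ _, if_neg (fun h => hteq h.symm)]

theorem dpr_ok {n : Nat} {e : List Int} {d : PySem.Dict (List Int) Int}
    (hd : DictOK n d) (he : SL n e) : DictOK n (pvDPRound e d) := by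
  rw [dpRound_eq]
  exact dpr_go_ok he _ _ hd
    (fun sc hsc => hd.2 sc.1 (PySem.Dict.mem_keys_of_mem_items _ hsc))


theorem dpr_get {n : Nat} {e : List Int} {d : PySem.Dict (List Int) Int}
    (hd : DictOK n d) (he : SL n e) {t : List Int} (ht : SL n t) :
    PySem.Dict.get? (pvDPRound e d) t =
      omin (PySem.Dict.get? d t) ((PySem.Dict.get? d (pvXorRow t e)).map (· + 1)) := by
  rw [dpRound_eq, dpr_go_get he _ _ hd
    (fun sc hsc => hd.2 sc.1 (PySem.Dict.mem_keys_of_mem_items _ hsc)) t ht]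
  congr 1
  cases hx : PySem.Dict.get? d (pvXorRow t e) with
  | none =>
    have hnil : d.items.filter (fun sc => pvXorRow sc.1 e == t) = [] := by
      rw [List.filter_eq_nil_iff]
      intro sc hsc hbeq
      have hsc1 : SL n sc.1 := hd.2 sc.1 (PySem.Dict.mem_keys_of_mem_items _ hsc)
      have hkeq : sc.1 = pvXorRow t e := by
        rw [← xr_invol hsc1 he, (beq_iff_eq.mp hbeq)]
      have hkmem := PySem.Dict.mem_keys_of_mem_items _ hsc
      rw [hkeq] at hkmem
      rw [PySem.Dict.get?_eq_none_iff_not_mem_keys _ _] at hx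
      exact hx hkmem
    simp [hnil]
  | some c =>
    have hmem : (pvXorRow t e, c) ∈ d.items := PySem.Dict.mem_items_of_get?_eq_some _ hx
    have hSLk : SL n (pvXorRow t e) := xr_SL ht he
    have hfmem : (pvXorRow t e, c) ∈ d.items.filter (fun sc => pvXorRow sc.1 e == t) := by
      rw [List.mem_filter]
      exact ⟨hmem, by simp [xr_invol ht he]⟩
    have hall : ∀ x ∈ (d.items.filter (fun sc => pvXorRow sc.1 e == t)).map
        (fun sc => sc.2 + 1), x = c + 1 := by
      intro x hxm
      obtain ⟨sc, hscf, rfl⟩ := List.mem_map.mp hxm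
      obtain ⟨hsci, hbeq⟩ := List.mem_filter.mp hscf
      have hsc1 : SL n sc.1 := hd.2 sc.1 (PySem.Dict.mem_keys_of_mem_items _ hsci)
      have hk : sc.1 = pvXorRow t e := by
        rw [← xr_invol hsc1 he, (beq_iff_eq.mp hbeq)]
      have h2 := PySem.Dict.get?_of_mem_items _ hsci hd.1
      rw [hk, hx] at h2
      have h3 := Option.some_inj.mp h2
      omega
    rw [min?_const_int (by
      intro hcon
      rw [List.map_eq_nil_iff] at hcon
      rw [hcon] at hfmem
      simp at hfmem) hall]
    rfl


theorem dp_main {n : Nat} (effs : List (List Int)) (hall : ∀ f ∈ effs, SL n f) :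
    DictOK n (effs.foldl (fun d e => pvDPRound e d)
        (PySem.Dict.insert PySem.Dict.empty (zerosL n) 0)) ∧
    ∀ t, SL n t →
      PySem.Dict.get? (effs.foldl (fun d e => pvDPRound e d)
          (PySem.Dict.insert PySem.Dict.empty (zerosL n) 0)) t =
        (msz n effs t).map (fun k => (k : Int)) := by
  induction effs using List.reverseRecOn with
  | nil =>
    constructor
    · refine ⟨?_, ?_⟩
      · have := PySem.Dict.nodup_keys_insert (PySem.Dict.empty (κ := List Int) (ν := Int))
          (zerosL n) 0 PySem.Dict.nodup_keys_empty
        simpa using this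
      · intro k hk
        rcases (PySem.Dict.mem_keys_insert _ _ _ _).mp hk with h | h
        · subst h; exact zerosL_SL n
        · simp [PySem.Dict.keys_empty] at h
    · intro t _
      simp only [List.foldl_nil]
      rw [PySem.Dict.get?_insert]
      by_cases ht0 : t = zerosL n
      · rw [if_pos ht0, ht0, msz_zeros]
        rfl
      · rw [if_neg ht0, PySem.Dict.get?_empty]
        have : msz n [] t = none := by
          rw [msz_eq_none_iff]
          intro c hc
          rw [List.sublist_nil] at hc
          subst hc
          intro h
          exact ht0 (by rw [← h]; rfl)
        rw [this]
        rfl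
  | append_singleton l e ih =>
    have halll : ∀ f ∈ l, SL n f := fun f hf => hall f (List.mem_append_left _ hf)
    have he : SL n e := hall e (by simp)
    obtain ⟨ihok, ihget⟩ := ih halll
    constructor
    · rw [List.foldl_append]
      exact dpr_ok ihok he
    · intro t ht
      rw [List.foldl_append, List.foldl_cons, List.foldl_nil]
      show PySem.Dict.get? (pvDPRound e _) t = _
      rw [dpr_get ihok he ht, ihget t ht, ihget (pvXorRow t e) (xr_SL ht he),
        msz_recur halll he ht]
      cases ha : msz n l t <;> cases hb : msz n l (pvXorRow t e) <;>
        simp [omin]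


theorem main_equiv (lights : List Int) (buttons : List (List Int)) :
    find_min_toggles lights buttons = find_min_toggles_alt lights buttons := by
  have hz : zerosL lights.length = List.replicate lights.length 0 := rfl
  by_cases h0 : lights = List.replicate lights.length 0
  · show pvLoopA lights buttons (2 ^ lights.length + 1)
      [(List.replicate lights.length 0, 0)]
      (PySem.Set.ofList [List.replicate lights.length 0]) = _
    rw [pvLoopA, if_pos h0.symm]
    unfold find_min_toggles_alt
    rw [if_pos h0]
  · have hallE : ∀ e ∈ buttons.map (fun b => pvEffect lights.length b),
        SL lights.length e := by
      intro e he
      obtain ⟨b, _, rfl⟩ := List.mem_map.mp he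
      exact effect_SL lights.length b
    obtain ⟨hok, hget⟩ :=
      dp_main (n := lights.length) (buttons.map (fun b => pvEffect lights.length b)) hallE
    have hBeq : find_min_toggles_alt lights buttons =
        PySem.Dict.get?
          ((buttons.map (fun b => pvEffect lights.length b)).foldl (fun d e => pvDPRound e d)
            (PySem.Dict.insert PySem.Dict.empty (zerosL lights.length) 0)) lights := by
      unfold find_min_toggles_alt
      rw [if_neg h0]
      rfl
    have hofl : PySem.Set.ofList [List.replicate lights.length (0 : Int)] =
        [List.replicate lights.length (0 : Int)] := rfl
    have hAeq : find_min_toggles lights buttons =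
        pvLoopA lights buttons (2 ^ lights.length + 1)
          [(List.replicate lights.length 0, 0)] [List.replicate lights.length 0] := by
      show pvLoopA lights buttons (2 ^ lights.length + 1)
        [(List.replicate lights.length 0, 0)]
        (PySem.Set.ofList [List.replicate lights.length 0]) = _
      rw [hofl]
    by_cases hSL : SL lights.length lights
    · have hA := loopA_inner lights buttons (2 * (2 ^ lights.length - 1) + 1 + 2 * 0) 0
        [List.replicate lights.length 0] [] [List.replicate lights.length 0]
        (2 ^ lights.length + 1)
        (by simp)
        (List.nodup_singleton _)
        (by
          intro s hs
          simp only [List.mem_singleton] at hs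
          subst hs
          exact zerosL_SL lights.length)
        List.nodup_nil
        (by
          intro s hs
          simp only [List.mem_singleton] at hs
          subst hs
          exact msz_zeros lights.length _)
        (by intro t ht; simp at ht)
        (by
          intro t
          constructor
          · intro ht
            simp only [List.mem_singleton] at ht
            subst ht
            exact Or.inl ⟨0, le_refl 0, msz_zeros lights.length _⟩
          · rintro (⟨k, hk, hm⟩ | hm)
            · have hk0 : k = 0 := by omega
              subst hk0
              have := msz_eq_zero hm
              simp only [List.mem_singleton]
              exact this.trans hz
            · simp at hm)
        (by
          intro t ht
          obtain ⟨s, hs, e, he, rfl⟩ := msz_pred hallE ht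
          have hs0 : s = zerosL lights.length := msz_eq_zero hs
          obtain ⟨b, hb, rfl⟩ := List.mem_map.mp he
          refine Or.inr ⟨s, ?_, b, hb, ?_⟩
          · simp only [List.mem_singleton]
            exact hs0.trans hz
          · rw [press_eq_xr_effect (msz_SL hallE hs) b])
        (by
          intro h
          have := msz_eq_zero h
          simp only [List.mem_singleton]
          exact this.trans hz)
        (by intro k hk; omega)
        (by
          simp only [List.length_singleton, List.length_nil]
          have := Nat.one_le_two_pow (n := lights.length)
          omega)
      have hq : ([List.replicate lights.length (0 : Int)].map
            (fun s => (s, ((0 : Nat) : Int)))) ++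
          (([] : List (List Int)).map (fun s => (s, ((0 : Nat) : Int) + 1))) =
          [(List.replicate lights.length (0 : Int), (0 : Int))] := by
        simp
      rw [hq] at hA
      rw [hAeq, hA, hBeq, hget lights hSL]
    · have hAnone : pvLoopA lights buttons (2 ^ lights.length + 1)
          [(List.replicate lights.length 0, 0)] [List.replicate lights.length 0] = none := by
        apply loopA_none_of_not_SL hSL
        intro p hp
        simp only [List.mem_singleton] at hp
        subst hp
        exact zerosL_SL lights.length
      have hBnone : PySem.Dict.get?
          ((buttons.map (fun b => pvEffect lights.length b)).foldl (fun d e => pvDPRound e d)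
            (PySem.Dict.insert PySem.Dict.empty (zerosL lights.length) 0)) lights = none := by
        rw [PySem.Dict.get?_eq_none_iff_not_mem_keys _ _]
        intro hmem
        exact hSL (hok.2 lights hmem)
      rw [hAeq, hAnone, hBeq, hBnone]

-- ===== VERDICT (by name: the statement is the Claim_ definition above) =====
theorem find_min_toggles_spec : Claim_equal_find_min_toggles := by
  intro lights buttons _ _
  show find_min_toggles lights buttons = find_min_toggles_alt lights buttons
  exact main_equiv lights buttons
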